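-- pv_equiv track=rewrite | github.com/ecolban/Codewars | python_code/src/unfinished-game.py | divide_pot1
-- ===== SOURCE A (Python) =====
-- from functools import lru_cache, reduce
-- from math import exp, gcd, log, ceil
--
-- def divide_pot1(score):
--     """Uses recursion and may result in stack overflow."""
--
--     num_players = len(score)
--
--     @lru_cache(maxsize=None)
--     def h(score_):
--         e = sum(score_) - num_players
--         distr = [[num_players ** e if j == i else 0 for j in range(len(score_))] if s - 1 == 0
--                  else h(tuple(s_ - 1 if i == j else s_ for j, s_ in enumerate(score_)))
--                  for i, s in enumerate(score_)]
--         return [sum(a) for a in zip(*distr)]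
--
--     preliminary_result = h(tuple(score))
--     d = reduce(gcd, preliminary_result)
--     return [x // d for x in preliminary_result]
-- ===== SOURCE B (Python) =====
-- from functools import reduce
-- from math import comb, gcd
--
--
-- def divide_pot1(score):
--     """Direct per-player weight: sum over the points each opponent may hold
--     when this player scores their final point, counting orderings with
--     binomial coefficients and weighting by powers of the number of players."""
--     n = len(score)
--
--     def w(m, ts):
--         # number-weighted ways for the remaining opponents in ts to hold
--         # 0..t-1 points each, m points already placed before them
--         if not ts:
--             return 1
--         t, rest = ts[0], ts[1:]
--         return sum(comb(m + k, k) * n ** (t - 1 - k) * w(m + k, rest)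
--                    for k in range(t))
--
--     weights = [w(s - 1, score[:i] + score[i + 1:]) for i, s in enumerate(score)]
--     d = reduce(gcd, weights)
--     return [x // d for x in weights]
-- ===== Notes on version B (the rewrite author's own statement) =====
-- stated objective: alternative
-- what changed: A computes the weight vector by a recursion over whole score states (recursion depth = total remaining points, memoized); B instead computes each player's weight directly as a nested sum over the points every opponent can hold when that player scores the deciding point, counting interleavings with binomial coefficients, so the recursion is only as deep as the number of players.
import Mathlib
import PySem

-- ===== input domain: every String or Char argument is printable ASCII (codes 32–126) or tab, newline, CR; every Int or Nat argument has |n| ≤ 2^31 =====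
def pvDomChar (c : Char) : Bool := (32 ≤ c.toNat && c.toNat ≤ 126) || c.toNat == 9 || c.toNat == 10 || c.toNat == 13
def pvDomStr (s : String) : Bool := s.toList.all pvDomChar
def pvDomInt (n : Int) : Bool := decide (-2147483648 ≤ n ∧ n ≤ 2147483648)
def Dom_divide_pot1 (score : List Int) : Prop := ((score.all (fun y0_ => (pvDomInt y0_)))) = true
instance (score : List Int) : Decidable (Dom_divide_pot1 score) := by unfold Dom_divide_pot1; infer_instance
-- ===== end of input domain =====

-- B replaces A's recursion over whole score vectors by a direct per-player count
-- (orderings of the opponents' possible final points, via binomial coefficients);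
-- objective: alternative algorithm of similar cost, with only shallow recursion.

-- ===== PORT A =====
-- `[sum(a) for a in zip(*distr)]`: column sums up to the shortest row (exact zip semantics)
def pvZipCols (rows : List (List Int)) : List Int :=
  match rows with
  | [] => []
  | r :: rs =>
    let mlen := rs.foldl (fun m l => min m l.length) r.length
    (List.range mlen).map (fun k => ((r :: rs).map (fun row => row.getD k 0)).sum)

-- the inner recursive `h`, with its lru_cache ported as an explicit dict threaded in
-- evaluation order; fuel makes the recursion total (A's recursion terminates on every
-- input admitted by Pre_, and the fuel chosen in divide_pot1 is then never exhausted)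
def hA (n : Nat) : Nat → List Int → PySem.Dict (List Int) (List Int) →
    List Int × PySem.Dict (List Int) (List Int)
  | 0, _, c => ([], c)
  | fuel+1, s, c =>
    match PySem.Dict.get? c s with
    | some v => (v, c)
    | none =>
      let e := (s.sum - n).toNat
      let step := (PySem.List.enumerate s).foldl
        (fun (acc : List (List Int) × PySem.Dict (List Int) (List Int)) p =>
          if p.2 - 1 = 0 then
            (acc.1 ++ [(List.range s.length).map
              (fun (j : Nat) => if (j : Int) = p.1 then (n : Int) ^ e else 0)], acc.2)
          else
            let r := hA n fuel
              ((PySem.List.enumerate s).map (fun q => if p.1 = q.1 then q.2 - 1 else q.2)) acc.2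
            (acc.1 ++ [r.1], r.2))
        ([], c)
      let res := pvZipCols step.1
      (res, PySem.Dict.insert step.2 s res)

def divide_pot1 (score : List Int) : List Int :=
  let pr := (hA score.length (score.sum.toNat + 1) score PySem.Dict.empty).1
  match pr with
  | [] => []  -- Python: reduce over an empty sequence raises TypeError (excluded by Pre_)
  | x :: xs =>
    let d := xs.foldl (fun a b => (Int.gcd a b : Int)) x
    pr.map (fun y => PySem.Int.floordiv y d)

-- ===== PORT B =====
-- `w(m, ts)` from Source B; comb(m+k, k) = Nat.choose, exact since m ≥ 0 on admitted inputs
def wB (n : Nat) : Int → List Int → Int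
  | _, [] => 1
  | m, t :: rest =>
    ((List.range t.toNat).map (fun (k : Nat) =>
      ((m + (k : Int)).toNat.choose k : Int) * (n : Int) ^ ((t - 1 - (k : Int)).toNat)
        * wB n (m + (k : Int)) rest)).sum
  termination_by _ ts => ts.length

def divide_pot1_alt (score : List Int) : List Int :=
  let weights := (PySem.List.enumerate score).map (fun p =>
    wB score.length (p.2 - 1) (score.take p.1.toNat ++ score.drop (p.1.toNat + 1)))
  match weights with
  | [] => []  -- Python: reduce over an empty sequence raises TypeError (excluded by Pre_)
  | x :: xs =>
    let d := xs.foldl (fun a b => (Int.gcd a b : Int)) x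
    weights.map (fun y => PySem.Int.floordiv y d)

-- ===== PRECONDITION & SPEC =====
-- Pre_ excludes exactly the inputs on which Python A raises: the empty list (reduce()
-- over an empty sequence, TypeError) and any score with an entry ≤ 0 (h recurses forever,
-- RecursionError).
def Pre_divide_pot1 (score : List Int) : Prop := score ≠ [] ∧ ∀ x ∈ score, 1 ≤ x
instance (score : List Int) : Decidable (Pre_divide_pot1 score) := by unfold Pre_divide_pot1; infer_instance
def pvWitness_divide_pot1 : List Int := [3, 2]

def Spec_divide_pot1 (score : List Int) (out : List Int) : Prop := out = divide_pot1_alt score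
instance (score : List Int) (out : List Int) : Decidable (Spec_divide_pot1 score out) := by unfold Spec_divide_pot1; infer_instance

-- ===== CLAIM (what is proved, stated in full; the proofs are below) =====
def Claim_equal_divide_pot1 : Prop := ∀ (score : List Int), Dom_divide_pot1 score → Pre_divide_pot1 score → Spec_divide_pot1 score (divide_pot1 score)

-- ===== LEMMAS AND PROOFS =====

-- Nat-world mirror of wB, with Finset sums (proof layer only)
def pvW (n : Nat) : Nat → List Nat → Int
  | _, [] => 1
  | m, t :: rest =>
    ∑ k ∈ Finset.range t, ((m + k).choose k : Int) * (n : Int) ^ (t - 1 - k) * pvW n (m + k) rest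
  termination_by _ ts => ts.length

-- player i's weight, Nat world
def pvG (n : Nat) (S : List Nat) (i : Nat) : Int :=
  pvW n (S.getD i 0 - 1) (S.take i ++ S.drop (i + 1))

lemma pv_sum_range (N : Nat) (f : Nat → Int) :
    ((List.range N).map f).sum = ∑ k ∈ Finset.range N, f k := by
  induction N with
  | zero => simp
  | succ N ih => simp [List.range_succ, Finset.sum_range_succ, ih]

lemma pv_pvW_cons (n m t : Nat) (rest : List Nat) :
    pvW n m (t :: rest) =
      ∑ k ∈ Finset.range t, ((m + k).choose k : Int) * (n : Int) ^ (t - 1 - k) * pvW n (m + k) rest := by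
  rw [pvW]

lemma pv_getD_toNat (s : List Int) (j : Nat) :
    (s.map Int.toNat).getD j 0 = (s.getD j 0).toNat := by
  by_cases hj : j < s.length
  · rw [List.getD_eq_getElem _ _ (by simpa using hj), List.getD_eq_getElem _ _ hj,
      List.getElem_map]
  · rw [List.getD_eq_default _ _ (by simpa using (not_lt.mp hj)),
      List.getD_eq_default _ _ (not_lt.mp hj)]
    rfl

lemma pv_wB_eq_pvW (n : Nat) (ts : List Int) (m : Nat) (h : ∀ x ∈ ts, 0 ≤ x) :
    wB n (m : Int) ts = pvW n m (ts.map Int.toNat) := by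
  induction ts generalizing m with
  | nil => simp [wB, pvW]
  | cons t rest ih =>
    have ht : 0 ≤ t := h t (by simp)
    rw [wB, pv_sum_range, List.map_cons, pv_pvW_cons]
    refine Finset.sum_congr rfl ?_
    intro k hk
    rw [Finset.mem_range] at hk
    have h1 : ((m : Int) + (k : Int)).toNat = m + k := by omega
    have h2 : ((t : Int) - 1 - (k : Int)).toNat = t.toNat - 1 - k := by omega
    have h3 : (m : Int) + (k : Int) = ((m + k : Nat) : Int) := by push_cast; ring
    rw [h1, h2, h3, ih (m + k) (fun x hx => h x (List.mem_cons_of_mem t hx))]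

lemma pv_len_le_sum (l : List Nat) (h : ∀ x ∈ l, 1 ≤ x) : l.length ≤ l.sum := by
  induction l with
  | nil => simp
  | cons a l ih =>
    have := h a (by simp)
    have := ih (fun x hx => h x (by simp [hx]))
    simp only [List.length_cons, List.sum_cons]; omega

lemma pv_sum_range_add (a b : Nat) (f : Nat → Int) :
    ∑ j ∈ Finset.range (a + b), f j =
      (∑ j ∈ Finset.range a, f j) + ∑ p ∈ Finset.range b, f (a + p) := by
  induction b with
  | zero => simp
  | succ b ih => rw [← Nat.add_assoc, Finset.sum_range_succ, Finset.sum_range_succ, ih]; ring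

-- the W-recurrence: first-point decomposition of the direct count
lemma pv_core (n : Nat) (ts : List Nat) (m : Nat) (h1 : ∀ x ∈ ts, 1 ≤ x) :
    pvW n m ts =
      (if m = 0 then (n : Int) ^ (ts.sum - ts.length) else pvW n (m - 1) ts)
      + ∑ p ∈ Finset.range ts.length,
          (if 2 ≤ ts.getD p 0 then pvW n m (ts.set p (ts.getD p 0 - 1)) else 0) := by
  induction ts generalizing m with
  | nil => cases m <;> simp [pvW]
  | cons t ts ih =>
    have ht : 1 ≤ t := h1 t (by simp)
    have hts : ∀ x ∈ ts, 1 ≤ x := fun x hx => h1 x (List.mem_cons_of_mem t hx)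
    have hlen : ts.length ≤ ts.sum := pv_len_le_sum ts hts
    obtain ⟨T, rfl⟩ : ∃ T, t = T + 1 := ⟨t - 1, by omega⟩
    rw [pv_pvW_cons]
    -- expand the inner pvW's with the induction hypothesis and distribute
    have hexp : ∀ k ∈ Finset.range (T + 1),
        (((m + k).choose k : Int) * (n : Int) ^ (T + 1 - 1 - k) * pvW n (m + k) ts)
          = ((m + k).choose k : Int) * (n : Int) ^ (T - k) *
              (if m + k = 0 then (n : Int) ^ (ts.sum - ts.length) else pvW n (m + k - 1) ts)
            + ∑ p ∈ Finset.range ts.length, (if 2 ≤ ts.getD p 0 then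
                ((m + k).choose k : Int) * (n : Int) ^ (T - k) * pvW n (m + k) (ts.set p (ts.getD p 0 - 1))
              else 0) := by
      intro k _
      rw [ih (m + k) hts, Nat.add_sub_cancel, mul_add, Finset.mul_sum]
      congr 1
      refine Finset.sum_congr rfl ?_
      intro p _
      split_ifs <;> simp
    rw [Finset.sum_congr rfl hexp, Finset.sum_add_distrib, Finset.sum_comm]
    -- the decrement-terms of the tail match the p ≥ 1 part of the claimed sum
    have htail : ∀ p ∈ Finset.range ts.length,
        (∑ k ∈ Finset.range (T + 1), (if 2 ≤ ts.getD p 0 then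
            ((m + k).choose k : Int) * (n : Int) ^ (T - k) * pvW n (m + k) (ts.set p (ts.getD p 0 - 1))
          else 0))
          = (if 2 ≤ ts.getD p 0 then pvW n m ((T + 1) :: ts.set p (ts.getD p 0 - 1)) else 0) := by
      intro p _
      split_ifs with hp
      · rw [pv_pvW_cons]
        refine Finset.sum_congr rfl ?_
        intro k _
        rw [Nat.add_sub_cancel]
      · simp
    rw [Finset.sum_congr rfl htail]
    -- split the claimed position-sum into head and tail positions
    have hsplit : ∑ p ∈ Finset.range (((T + 1) :: ts).length),
        (if 2 ≤ ((T + 1) :: ts).getD p 0 then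
            pvW n m (((T + 1) :: ts).set p (((T + 1) :: ts).getD p 0 - 1)) else 0)
        = (∑ p ∈ Finset.range ts.length, (if 2 ≤ ts.getD p 0 then
              pvW n m ((T + 1) :: ts.set p (ts.getD p 0 - 1)) else 0))
          + (if 2 ≤ T + 1 then pvW n m (T :: ts) else 0) := by
      rw [List.length_cons, Finset.sum_range_succ']
      simp only [List.getD_cons_succ, List.set_cons_succ, List.getD_cons_zero,
        List.set_cons_zero, Nat.add_sub_cancel]
    rw [hsplit]
    -- core head identity
    have hkey : (∑ k ∈ Finset.range (T + 1), (((m + k).choose k : Int) * (n : Int) ^ (T - k) *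
          (if m + k = 0 then (n : Int) ^ (ts.sum - ts.length) else pvW n (m + k - 1) ts)))
        = (if m = 0 then (n : Int) ^ (((T + 1) :: ts).sum - ((T + 1) :: ts).length)
            else pvW n (m - 1) ((T + 1) :: ts))
          + (if 2 ≤ T + 1 then pvW n m (T :: ts) else 0) := by
      cases m with
      | zero =>
        rw [Finset.sum_range_succ']
        simp only [Nat.zero_add, Nat.choose_self, Nat.cast_one, one_mul, Nat.add_sub_cancel,
          Nat.sub_zero, if_neg (Nat.succ_ne_zero _), List.sum_cons, List.length_cons, if_true]
        have hpow : (n : Int) ^ T * (n : Int) ^ (ts.sum - ts.length)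
            = (n : Int) ^ ((T + 1 + ts.sum) - (ts.length + 1)) := by
          rw [← pow_add]; congr 1; omega
        rw [hpow]
        cases T with
        | zero => simp
        | succ T' =>
          rw [if_pos (by omega), add_comm ((n : Int) ^ _ : Int), pv_pvW_cons]
          congr 1
          refine Finset.sum_congr rfl ?_
          intro i hi
          rw [Finset.mem_range] at hi
          have h2 : T' + 1 - (i + 1) = T' + 1 - 1 - i := by omega
          simp [h2, Nat.choose_self]
      | succ μ =>
        simp only [if_neg (Nat.succ_ne_zero _), Nat.succ_sub_one]
        have harg : ∀ k, μ + 1 + k - 1 = μ + k := by omega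
        rw [pv_pvW_cons]
        cases T with
        | zero => simp
        | succ T' =>
          rw [if_pos (by omega), pv_pvW_cons]
          rw [Finset.sum_range_succ' _ (T' + 1), Finset.sum_range_succ' _ (T' + 1)]
          simp only [Nat.add_sub_cancel, Nat.choose_zero_right, Nat.add_zero, Nat.cast_one,
            one_mul, Nat.sub_zero]
          rw [add_right_comm, ← Finset.sum_add_distrib]
          congr 1
          refine Finset.sum_congr rfl ?_
          intro i hi
          rw [Finset.mem_range] at hi
          rw [if_neg (by omega)]
          have e2 : T' + 1 - (i + 1) = T' - i := by omega
          have e3 : μ + 1 + (i + 1) - 1 = μ + (i + 1) := by omega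
          have e4 : μ + 1 + (i + 1) = (μ + (i + 1)) + 1 := by omega
          have e5 : μ + 1 + i = μ + (i + 1) := by omega
          rw [e2, e3, e4, e5, Nat.choose_succ_succ]
          push_cast
          ring
    rw [hkey]
    ring

lemma pv_getD_appL {α : Type} (U W : List α) (j : Nat) (d : α) (h : j < U.length) :
    (U ++ W).getD j d = U.getD j d := by
  induction U generalizing j with
  | nil => simp at h
  | cons a U ih =>
    cases j with
    | zero => rfl
    | succ j => simp only [List.cons_append, List.getD_cons_succ]; exact ih j (by simpa using h)

lemma pv_getD_appR {α : Type} (U W : List α) (q : Nat) (d : α) :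
    (U ++ W).getD (U.length + q) d = W.getD q d := by
  induction U with
  | nil => simp
  | cons a U ih =>
    have e : (a :: U).length + q = (U.length + q) + 1 := by simp; omega
    rw [e, List.cons_append, List.getD_cons_succ, ih]

lemma pv_set_appL {α : Type} (U W : List α) (j : Nat) (v : α) (h : j < U.length) :
    (U ++ W).set j v = U.set j v ++ W := by
  induction U generalizing j with
  | nil => simp at h
  | cons a U ih =>
    cases j with
    | zero => rfl
    | succ j => simp [ih j (by simp at h; omega)]

lemma pv_set_appR {α : Type} (U W : List α) (q : Nat) (v : α) :
    (U ++ W).set (U.length + q) v = U ++ W.set q v := by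
  induction U with
  | nil => simp
  | cons a U ih =>
    have e : (a :: U).length + q = (U.length + q) + 1 := by simp; omega
    rw [e, List.cons_append, List.set_cons_succ, ih]; rfl

lemma pv_take_mid {α : Type} (U V : List α) (t : α) :
    (U ++ t :: V).take U.length = U := by
  induction U with
  | nil => simp
  | cons a U ih => simp [ih]

lemma pv_drop_mid {α : Type} (U V : List α) (t : α) :
    (U ++ t :: V).drop (U.length + 1) = V := by
  induction U with
  | nil => simp
  | cons a U ih =>
    have e : (a :: U).length + 1 = (U.length + 1) + 1 := by simp
    rw [e, List.cons_append, List.drop_succ_cons, ih]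

lemma pv_pvG_mid (n : Nat) (U V : List Nat) (t : Nat) :
    pvG n (U ++ t :: V) U.length = pvW n (t - 1) (U ++ V) := by
  unfold pvG
  have h0 : (U ++ t :: V).getD U.length 0 = t := by
    have h1 := pv_getD_appR U (t :: V) 0 0
    rw [Nat.add_zero] at h1
    exact h1
  rw [h0, pv_take_mid, pv_drop_mid]

lemma pv_pvG_mid' (n k : Nat) (U V : List Nat) (t : Nat) (hk : k = U.length) :
    pvG n (U ++ t :: V) k = pvW n (t - 1) (U ++ V) := by
  subst hk
  exact pv_pvG_mid n U V t

-- decomposed form of the column identity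
lemma pv_step3 (n : Nat) (U V : List Nat) (t : Nat)
    (hU : ∀ x ∈ U, 1 ≤ x) (hV : ∀ x ∈ V, 1 ≤ x) (ht : 1 ≤ t)
    (hn : n = U.length + 1 + V.length) :
    (∑ j ∈ Finset.range n,
      (if (U ++ t :: V).getD j 0 = 1 then
          (if U.length = j then (n : Int) ^ ((U ++ t :: V).sum - n) else 0)
        else pvG n ((U ++ t :: V).set j ((U ++ t :: V).getD j 0 - 1)) U.length))
      = pvG n (U ++ t :: V) U.length := by
  have hUV : ∀ x ∈ U ++ V, 1 ≤ x := by
    intro x hx; rcases List.mem_append.mp hx with h | h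
    exacts [hU x h, hV x h]
  rw [pv_pvG_mid, pv_core n (U ++ V) (t - 1) hUV]
  subst hn
  rw [pv_sum_range_add (U.length + 1) V.length, Finset.sum_range_succ]
  rw [List.length_append, pv_sum_range_add U.length V.length]
  have e1 : ∀ j ∈ Finset.range U.length,
      (if (U ++ t :: V).getD j 0 = 1 then
          (if U.length = j then
            ((U.length + 1 + V.length : Nat) : Int) ^ ((U ++ t :: V).sum - (U.length + 1 + V.length))
          else 0)
        else pvG (U.length + 1 + V.length) ((U ++ t :: V).set j ((U ++ t :: V).getD j 0 - 1)) U.length)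
      = (if 2 ≤ (U ++ V).getD j 0 then
          pvW (U.length + 1 + V.length) (t - 1) ((U ++ V).set j ((U ++ V).getD j 0 - 1)) else 0) := by
    intro j hj
    rw [Finset.mem_range] at hj
    have hgl : (U ++ t :: V).getD j 0 = U.getD j 0 := pv_getD_appL _ _ _ _ hj
    have hgl2 : (U ++ V).getD j 0 = U.getD j 0 := pv_getD_appL _ _ _ _ hj
    have hUj : 1 ≤ U.getD j 0 := by
      rw [List.getD_eq_getElem _ _ hj]; exact hU _ (List.getElem_mem hj)
    rw [hgl, hgl2]
    by_cases h1 : U.getD j 0 = 1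
    · rw [if_pos h1, if_neg (by omega), if_neg (by omega)]
    · rw [if_neg h1, if_pos (by omega), pv_set_appL _ _ _ _ hj, pv_set_appL _ _ _ _ hj,
        pv_pvG_mid' _ _ _ _ _ (by simp)]
  have e2 : (if (U ++ t :: V).getD U.length 0 = 1 then
        (if U.length = U.length then
          ((U.length + 1 + V.length : Nat) : Int) ^ ((U ++ t :: V).sum - (U.length + 1 + V.length))
        else 0)
      else pvG (U.length + 1 + V.length)
        ((U ++ t :: V).set U.length ((U ++ t :: V).getD U.length 0 - 1)) U.length)
      = (if t - 1 = 0 then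
          ((U.length + 1 + V.length : Nat) : Int) ^ ((U ++ V).sum - (U.length + V.length))
        else pvW (U.length + 1 + V.length) (t - 1 - 1) (U ++ V)) := by
    have hg : (U ++ t :: V).getD U.length 0 = t := by
      have h1 := pv_getD_appR U (t :: V) 0 0
      rw [Nat.add_zero] at h1
      exact h1
    rw [hg]
    by_cases h1t : t = 1
    · subst h1t
      rw [if_pos rfl, if_pos rfl, if_pos rfl]
      congr 1
      simp only [List.sum_append, List.sum_cons]
      omega
    · rw [if_neg h1t, if_neg (by omega)]
      have hset : (U ++ t :: V).set U.length (t - 1) = U ++ (t - 1) :: V := by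
        have h1 := pv_set_appR U (t :: V) 0 (t - 1)
        rw [Nat.add_zero] at h1
        rw [h1]
        rfl
      rw [hset, pv_pvG_mid]
  have e3 : ∀ p ∈ Finset.range V.length,
      (if (U ++ t :: V).getD (U.length + 1 + p) 0 = 1 then
          (if U.length = U.length + 1 + p then
            ((U.length + 1 + V.length : Nat) : Int) ^ ((U ++ t :: V).sum - (U.length + 1 + V.length))
          else 0)
        else pvG (U.length + 1 + V.length)
          ((U ++ t :: V).set (U.length + 1 + p) ((U ++ t :: V).getD (U.length + 1 + p) 0 - 1)) U.length)
      = (if 2 ≤ (U ++ V).getD (U.length + p) 0 then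
          pvW (U.length + 1 + V.length) (t - 1)
            ((U ++ V).set (U.length + p) ((U ++ V).getD (U.length + p) 0 - 1)) else 0) := by
    intro p hp
    rw [Finset.mem_range] at hp
    have hidx : U.length + 1 + p = U.length + (p + 1) := by omega
    have hg : (U ++ t :: V).getD (U.length + (p + 1)) 0 = V.getD p 0 := by
      rw [pv_getD_appR, List.getD_cons_succ]
    have hg2 : (U ++ V).getD (U.length + p) 0 = V.getD p 0 := pv_getD_appR _ _ _ _
    have hVp : 1 ≤ V.getD p 0 := by
      rw [List.getD_eq_getElem _ _ hp]; exact hV _ (List.getElem_mem hp)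
    rw [hidx, hg, hg2]
    by_cases h1 : V.getD p 0 = 1
    · rw [if_pos h1, if_neg (by omega), if_neg (by omega)]
    · rw [if_neg h1, if_pos (by omega), pv_set_appR, pv_set_appR, List.set_cons_succ,
        pv_pvG_mid]
  rw [Finset.sum_congr rfl e1, Finset.sum_congr rfl e3, e2]
  ring

lemma pv_enum_map_aux {β : Type} (s : List Int) (st : Int) (F : Int × Int → β) :
    (PySem.List.enumerate s st).map F
      = (List.range s.length).map (fun (j : Nat) => F ((st + (j : Int)), s.getD j 0)) := by
  induction s generalizing st with
  | nil => simp [PySem.List.enumerate_nil]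
  | cons a s ih =>
    rw [PySem.List.enumerate_cons, List.map_cons, ih, List.length_cons,
      List.range_succ_eq_map, List.map_cons, List.map_map]
    simp only [List.getD_cons_zero, Nat.cast_zero, add_zero]
    congr 1
    apply List.map_congr_left
    intro j _
    simp only [Function.comp_apply, List.getD_cons_succ, Nat.cast_succ]
    ring_nf

lemma pv_enum_eq (s : List Int) :
    PySem.List.enumerate s 0
      = (List.range s.length).map (fun (j : Nat) => ((j : Int), s.getD j 0)) := by
  have h := pv_enum_map_aux s 0 (fun p => p)
  simpa using h

lemma pv_enum_dec (s : List Int) (j : Nat) (_hj : j < s.length) :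
    (PySem.List.enumerate s 0).map (fun q => if (j : Int) = q.1 then q.2 - 1 else q.2)
      = s.set j (s.getD j 0 - 1) := by
  rw [pv_enum_map_aux]
  apply List.ext_getElem
  · simp
  intro i hi1 hi2
  have hi : i < s.length := by simpa using hi1
  by_cases hij : j = i
  · subst hij
    simp
  · have hij' : ¬((j : Int) = (i : Int)) := by exact_mod_cast hij
    simp [hij, List.getElem?_eq_getElem hi]

lemma pv_zipCols (n : Nat) (rows : List (List Int)) (hne : rows ≠ [])
    (hl : ∀ r ∈ rows, r.length = n) :
    pvZipCols rows = (List.range n).map (fun k => (rows.map (fun r => r.getD k 0)).sum) := by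
  cases rows with
  | nil => exact absurd rfl hne
  | cons r rs =>
    have haux : ∀ (L : List (List Int)) (acc : Nat), (∀ x ∈ L, x.length = n) → acc = n →
        L.foldl (fun m l => min m l.length) acc = n := by
      intro L
      induction L with
      | nil => intro acc _ h; simpa using h
      | cons a L ih =>
        intro acc hmem hacc
        simp only [List.foldl_cons]
        exact ih _ (fun x hx => hmem x (by simp [hx]))
          (by rw [hacc, hmem a (by simp)]; simp)
    have hmlen : rs.foldl (fun m l => min m l.length) r.length = n :=
      haux rs r.length (fun x hx => hl x (by simp [hx])) (hl r (by simp))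
    simp only [pvZipCols, hmlen]

lemma pv_sum_toNat (s : List Int) (h : ∀ x ∈ s, 0 ≤ x) :
    s.sum = ((s.map Int.toNat).sum : Int) := by
  induction s with
  | nil => simp
  | cons a s ih =>
    have ha := h a (by simp)
    rw [List.map_cons, List.sum_cons, List.sum_cons,
      ih (fun x hx => h x (List.mem_cons_of_mem a hx))]
    push_cast; omega

lemma pv_len_le_sum_int (s : List Int) (h : ∀ x ∈ s, 1 ≤ x) : (s.length : Int) ≤ s.sum := by
  induction s with
  | nil => simp
  | cons a s ih =>
    have h1 := h a (by simp)
    have h2 := ih (fun x hx => h x (List.mem_cons_of_mem a hx))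
    simp only [List.length_cons, List.sum_cons]
    push_cast
    omega

lemma pv_sum_set_int (s : List Int) (j : Nat) (v : Int) (hj : j < s.length) :
    (s.set j v).sum = s.sum - s.getD j 0 + v := by
  induction s generalizing j with
  | nil => simp at hj
  | cons a s ih =>
    cases j with
    | zero => simp only [List.set_cons_zero, List.sum_cons, List.getD_cons_zero]; ring
    | succ j =>
      simp only [List.set_cons_succ, List.sum_cons, List.getD_cons_succ,
        ih j (by simpa using hj)]
      ring

lemma pv_getD_map_range {α : Type} (n k : Nat) (g : Nat → α) (d : α) (h : k < n) :
    ((List.range n).map g).getD k d = g k := by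
  rw [List.getD_eq_getElem _ _ (by simpa using h), List.getElem_map, List.getElem_range]

lemma pv_step3S (n : Nat) (S : List Nat) (hlen : S.length = n) (h1 : ∀ x ∈ S, 1 ≤ x)
    (kk : Nat) (hk : kk < n) :
    (∑ j ∈ Finset.range n,
      (if S.getD j 0 = 1 then (if kk = j then (n : Int) ^ (S.sum - n) else 0)
        else pvG n (S.set j (S.getD j 0 - 1)) kk))
      = pvG n S kk := by
  have hkl : kk < S.length := by omega
  have hS : S = S.take kk ++ S[kk] :: S.drop (kk + 1) := by
    conv_lhs => rw [← List.take_append_drop kk S]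
    rw [List.drop_eq_getElem_cons hkl]
  obtain ⟨U, V, t, hSd, hUl⟩ : ∃ U V t, S = U ++ t :: V ∧ U.length = kk :=
    ⟨S.take kk, S.drop (kk + 1), S[kk], hS, by rw [List.length_take]; omega⟩
  have hU : ∀ x ∈ U, 1 ≤ x := fun x hx => h1 x (by rw [hSd]; exact List.mem_append_left _ hx)
  have hV : ∀ x ∈ V, 1 ≤ x := fun x hx =>
    h1 x (by rw [hSd]; exact List.mem_append_right _ (List.mem_cons_of_mem t hx))
  have ht : 1 ≤ t := h1 t (by rw [hSd]; exact List.mem_append_right _ (List.mem_cons_self))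
  have hn' : n = U.length + 1 + V.length := by
    have hc := congrArg List.length hSd
    simp only [List.length_append, List.length_cons] at hc
    omega
  rw [hSd, ← hUl]
  exact pv_step3 n U V t hU hV ht hn'

def pvH (n : Nat) (s : List Int) : List Int :=
  (List.range n).map (fun i => pvG n (s.map Int.toNat) i)

def pvCacheOK (n : Nat) (c : PySem.Dict (List Int) (List Int)) : Prop :=
  ∀ k v, PySem.Dict.get? c k = some v → v = pvH n k

lemma pv_body (n : Nat) (hn : 0 < n) (s : List Int) (hlen : s.length = n)
    (hpos : ∀ x ∈ s, 1 ≤ x) :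
    pvZipCols ((List.range s.length).map (fun j =>
      if s.getD j 0 - 1 = 0 then
        (List.range s.length).map (fun (i : Nat) =>
          if (i : Int) = (j : Int) then (n : Int) ^ (s.sum - (n : Int)).toNat else 0)
      else pvH n (s.set j (s.getD j 0 - 1))))
      = pvH n s := by
  have hS1 : ∀ x ∈ s.map Int.toNat, 1 ≤ x := by
    intro x hx
    obtain ⟨y, hy, rfl⟩ := List.mem_map.mp hx
    have := hpos y hy
    omega
  have hSlen : (s.map Int.toNat).length = n := by simpa using hlen
  have hsum : s.sum = (((s.map Int.toNat).sum : Nat) : Int) :=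
    pv_sum_toNat s (fun x hx => le_trans (by norm_num) (hpos x hx))
  have hnle : (n : Int) ≤ s.sum := by
    rw [← hlen]
    exact pv_len_le_sum_int s hpos
  have hE : (s.sum - (n : Int)).toNat = (s.map Int.toNat).sum - n := by omega
  have hmap : ∀ j ∈ List.range s.length,
      (if s.getD j 0 - 1 = 0 then
          (List.range s.length).map (fun (i : Nat) =>
            if (i : Int) = (j : Int) then (n : Int) ^ (s.sum - (n : Int)).toNat else 0)
        else pvH n (s.set j (s.getD j 0 - 1)))
      = (if s.getD j 0 - 1 = 0 then
          (List.range n).map (fun (i : Nat) =>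
            if (i : Int) = (j : Int) then (n : Int) ^ ((s.map Int.toNat).sum - n) else 0)
        else (List.range n).map (fun i =>
          pvG n ((s.map Int.toNat).set j ((s.map Int.toNat).getD j 0 - 1)) i)) := by
    intro j hj
    rw [List.mem_range] at hj
    have hsj : 1 ≤ s.getD j 0 := by
      rw [List.getD_eq_getElem _ _ (by omega)]
      exact hpos _ (List.getElem_mem (by omega))
    by_cases hb : s.getD j 0 - 1 = 0
    · rw [if_pos hb, if_pos hb, hlen, hE]
    · rw [if_neg hb, if_neg hb]
      unfold pvH
      apply List.map_congr_left
      intro i _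
      congr 1
      rw [List.map_set]
      congr 1
      rw [pv_getD_toNat]
      omega
  rw [List.map_congr_left hmap, hlen]
  rw [pv_zipCols n _ (by simp [List.range_eq_nil]; omega) (by
    intro r hr
    obtain ⟨j, _, rfl⟩ := List.mem_map.mp hr
    split_ifs <;> simp)]
  unfold pvH
  apply List.map_congr_left
  intro k hk
  rw [List.mem_range] at hk
  rw [List.map_map, pv_sum_range]
  have hcols : ∀ j ∈ Finset.range n,
      (((fun r => r.getD k 0) ∘ fun j =>
          (if s.getD j 0 - 1 = 0 then
            (List.range n).map (fun (i : Nat) =>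
              if (i : Int) = (j : Int) then (n : Int) ^ ((s.map Int.toNat).sum - n) else 0)
          else (List.range n).map (fun i =>
            pvG n ((s.map Int.toNat).set j ((s.map Int.toNat).getD j 0 - 1)) i))) j)
      = (if (s.map Int.toNat).getD j 0 = 1 then
          (if k = j then (n : Int) ^ ((s.map Int.toNat).sum - n) else 0)
        else pvG n ((s.map Int.toNat).set j ((s.map Int.toNat).getD j 0 - 1)) k) := by
    intro j hj
    rw [Finset.mem_range] at hj
    have hsj : 1 ≤ s.getD j 0 := by
      rw [List.getD_eq_getElem _ _ (by omega)]
      exact hpos _ (List.getElem_mem (by omega))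
    have hSj : (s.map Int.toNat).getD j 0 = (s.getD j 0).toNat := pv_getD_toNat s j
    simp only [Function.comp_apply]
    by_cases hb : s.getD j 0 = 1
    · rw [if_pos (by omega), if_pos (by omega), pv_getD_map_range _ _ _ _ hk]
      by_cases hkj : k = j
      · rw [if_pos (by exact_mod_cast hkj), if_pos hkj]
      · rw [if_neg (by exact_mod_cast hkj), if_neg hkj]
    · rw [if_neg (by omega), if_neg (by omega), pv_getD_map_range _ _ _ _ hk]
  rw [Finset.sum_congr rfl hcols]
  exact pv_step3S n (s.map Int.toNat) hSlen hS1 k hk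

lemma pv_memo (n : Nat) (hn : 0 < n) : ∀ (fuel : Nat) (s : List Int)
    (c : PySem.Dict (List Int) (List Int)), s.length = n →
    (∀ x ∈ s, 1 ≤ x) → (s.sum - n).toNat < fuel → pvCacheOK n c →
    (hA n fuel s c).1 = pvH n s ∧ pvCacheOK n (hA n fuel s c).2 := by
  intro fuel
  induction fuel with
  | zero => intro s c _ _ hf _; omega
  | succ f ih =>
    intro s c hlen hpos hf hc
    simp only [hA]
    cases hget : PySem.Dict.get? c s with
    | some v => exact ⟨hc s v hget, hc⟩
    | none =>
      dsimp only
      rw [PySem.List.foldl_congr_mem (PySem.List.enumerate s) _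
        (fun (acc : List (List Int) × PySem.Dict (List Int) (List Int)) (p : Int × Int) =>
          if p.2 - 1 = 0 then
            (acc.1 ++ [(List.range s.length).map
              (fun (j : Nat) => if (j : Int) = p.1 then (n : Int) ^ (s.sum - (n : Int)).toNat else 0)], acc.2)
          else
            (acc.1 ++ [(hA n f (s.set p.1.toNat (s.getD p.1.toNat 0 - 1)) acc.2).1],
              (hA n f (s.set p.1.toNat (s.getD p.1.toNat 0 - 1)) acc.2).2))
        ([], c) (by
          intro acc x hx
          obtain ⟨k, hk, rfl⟩ := (PySem.List.mem_enumerate_iff s 0 x).mp hx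
          simp only [zero_add, Int.toNat_natCast]
          rw [pv_enum_dec s k hk])]
      rw [pv_enum_eq, List.foldl_map]
      simp only [Int.toNat_natCast]
      have hfold : ∀ (l : List Nat), (∀ j ∈ l, j < s.length) →
          ∀ (acc : List (List Int)) (c0 : PySem.Dict (List Int) (List Int)), pvCacheOK n c0 →
          (List.foldl (fun (acc : List (List Int) × PySem.Dict (List Int) (List Int)) (j : Nat) =>
              if s.getD j 0 - 1 = 0 then
                (acc.1 ++ [(List.range s.length).map
                  (fun (i : Nat) => if (i : Int) = (j : Int) then (n : Int) ^ (s.sum - (n : Int)).toNat else 0)], acc.2)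
              else
                (acc.1 ++ [(hA n f (s.set j (s.getD j 0 - 1)) acc.2).1],
                  (hA n f (s.set j (s.getD j 0 - 1)) acc.2).2)) (acc, c0) l).1
            = acc ++ l.map (fun j =>
                if s.getD j 0 - 1 = 0 then
                  (List.range s.length).map
                    (fun (i : Nat) => if (i : Int) = (j : Int) then (n : Int) ^ (s.sum - (n : Int)).toNat else 0)
                else pvH n (s.set j (s.getD j 0 - 1)))
            ∧ pvCacheOK n (List.foldl (fun (acc : List (List Int) × PySem.Dict (List Int) (List Int)) (j : Nat) =>
              if s.getD j 0 - 1 = 0 then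
                (acc.1 ++ [(List.range s.length).map
                  (fun (i : Nat) => if (i : Int) = (j : Int) then (n : Int) ^ (s.sum - (n : Int)).toNat else 0)], acc.2)
              else
                (acc.1 ++ [(hA n f (s.set j (s.getD j 0 - 1)) acc.2).1],
                  (hA n f (s.set j (s.getD j 0 - 1)) acc.2).2)) (acc, c0) l).2 := by
        intro l
        induction l with
        | nil => intro _ acc c0 hc0; exact ⟨by simp, hc0⟩
        | cons j l' ihl =>
          intro hl acc c0 hc0
          have hj : j < s.length := hl j (by simp)
          rw [List.foldl_cons, List.map_cons]
          by_cases hb : s.getD j 0 - 1 = 0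
          · rw [if_pos hb, if_pos hb]
            have := ihl (fun x hx => hl x (by simp [hx])) (acc ++ [(List.range s.length).map
              (fun (i : Nat) => if (i : Int) = (j : Int) then (n : Int) ^ (s.sum - (n : Int)).toNat else 0)]) c0 hc0
            rw [this.1]
            refine ⟨?_, this.2⟩
            simp
          · rw [if_neg hb, if_neg hb]
            have hsj : 1 ≤ s.getD j 0 := by
              rw [List.getD_eq_getElem _ _ (by omega)]
              exact hpos _ (List.getElem_mem (by omega))
            have hset1 : ∀ x ∈ s.set j (s.getD j 0 - 1), 1 ≤ x := by
              intro x hx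
              rcases List.mem_or_eq_of_mem_set hx with h | h
              · exact hpos x h
              · omega
            have hlset : (s.set j (s.getD j 0 - 1)).length = n := by simpa using hlen
            have hsum' : (s.set j (s.getD j 0 - 1)).sum = s.sum - 1 := by
              rw [pv_sum_set_int s j _ (by omega)]
              ring
            have hstrict : (n : Int) + 1 ≤ s.sum := by
              have h2 := pv_len_le_sum_int _ hset1
              rw [hsum'] at h2
              have h3 : ((s.set j (s.getD j 0 - 1)).length : Int) = (n : Int) := by
                exact_mod_cast congrArg (Nat.cast : Nat → Int) hlset
              omega
            obtain ⟨hr1, hr2⟩ := ih (s.set j (s.getD j 0 - 1)) c0 hlset hset1 (by omega) hc0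
            rw [hr1]
            have := ihl (fun x hx => hl x (by simp [hx]))
              (acc ++ [pvH n (s.set j (s.getD j 0 - 1))])
              (hA n f (s.set j (s.getD j 0 - 1)) c0).2 hr2
            rw [this.1]
            refine ⟨?_, this.2⟩
            simp
      obtain ⟨hf1, hf2⟩ := hfold (List.range s.length) (by simp) [] c hc
      rw [hf1, List.nil_append]
      have hres := pv_body n hn s hlen hpos
      refine ⟨hres, ?_⟩
      intro k v hkv
      rw [PySem.Dict.get?_insert] at hkv
      split at hkv
      · rename_i hks
        subst hks
        rw [hres] at hkv
        exact (Option.some_inj.mp hkv).symm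
      · exact hf2 k v hkv

lemma pv_alt_weights (s : List Int) (h1 : ∀ x ∈ s, 1 ≤ x) :
    (PySem.List.enumerate s 0).map (fun p =>
        wB s.length (p.2 - 1) (s.take p.1.toNat ++ s.drop (p.1.toNat + 1)))
      = (List.range s.length).map (fun i => pvG s.length (s.map Int.toNat) i) := by
  rw [pv_enum_map_aux]
  apply List.map_congr_left
  intro j hj
  rw [List.mem_range] at hj
  have hv : 1 ≤ s.getD j 0 := by
    rw [List.getD_eq_getElem _ _ hj]; exact h1 _ (List.getElem_mem hj)
  have hm : s.getD j 0 - 1 = (((s.getD j 0).toNat - 1 : Nat) : Int) := by omega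
  simp only [zero_add, Int.toNat_natCast]
  rw [hm, pv_wB_eq_pvW _ _ _ (by
    intro x hx
    rcases List.mem_append.mp hx with hx | hx
    · exact le_trans (by norm_num) (h1 x (List.mem_of_mem_take hx))
    · exact le_trans (by norm_num) (h1 x (List.mem_of_mem_drop hx)))]
  unfold pvG
  rw [List.map_append, List.map_take, List.map_drop, pv_getD_toNat]

-- ===== VERDICT (by name: the statement is the Claim_ definition above) =====
theorem divide_pot1_spec : Claim_equal_divide_pot1 := by
  intro score _hdom hpre
  obtain ⟨hne, hpos⟩ := hpre
  have hn : 0 < score.length := List.length_pos_of_ne_nil hne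
  unfold Spec_divide_pot1 divide_pot1 divide_pot1_alt
  have hmemo := pv_memo score.length hn (score.sum.toNat + 1) score PySem.Dict.empty rfl hpos
    (by omega) (by intro k v hkv; simp [PySem.Dict.get?_empty] at hkv)
  rw [hmemo.1, pvH, pv_alt_weights score hpos]
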